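-- pv_equiv track=rewrite | github.com/ericlow/technical-interviews | 260130-Sentry/01-solution.py | count_stack
-- ===== SOURCE A (Python) =====
-- from collections import OrderedDict
--
-- class Node:
--     def __init__(self, name: str):
--         self.name = name
--         self.count = 0
--         self.children = OrderedDict()  # preserves insertion order
--
-- def count_stack(traces: list[list[str]]) -> str:
--     root = Node("__root__")
--
--     for trace in traces:
--         node = root
--         for func in trace:
--             if func not in node.children:
--                 node.children[func] = Node(func)
--             node = node.children[func]
--             node.count += 1
--
--     lines = []
--
--     def render(node: Node, depth: int):
--         indent = "    " * depth
--         lines.append(f"{indent}{node.name}, {node.count * 10} ms")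
--         for child in node.children.values():
--             render(child, depth + 1)
--
--     for child in root.children.values():
--         render(child, 0)
--
--     return "\n".join(lines)
-- ===== SOURCE B (Python) =====
-- def count_stack(traces: list[list[str]]) -> str:
--     # No tree objects at all: recursively group the (suffix) traces by their
--     # first function, in first-occurrence order; a group's size is the count.
--     def go(group, depth):
--         seen = []
--         for t in group:
--             if t[0] not in seen:
--                 seen.append(t[0])
--         lines = []
--         for h in seen:
--             tails = [t[1:] for t in group if t[0] == h]
--             lines.append(f"{'    ' * depth}{h}, {len(tails) * 10} ms")
--             lines.extend(go([s for s in tails if s], depth + 1))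
--         return lines
--
--     return "\n".join(go([t for t in traces if t], 0))
-- ===== Notes on version B (the rewrite author's own statement) =====
-- stated objective: alternative
-- what changed: B builds no trie and no Node objects at all: it recursively groups the (suffix) traces by their first function in first-occurrence order and renders each group directly, the group size being the count, whereas A mutates an OrderedDict trie and then walks it.
import Mathlib
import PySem

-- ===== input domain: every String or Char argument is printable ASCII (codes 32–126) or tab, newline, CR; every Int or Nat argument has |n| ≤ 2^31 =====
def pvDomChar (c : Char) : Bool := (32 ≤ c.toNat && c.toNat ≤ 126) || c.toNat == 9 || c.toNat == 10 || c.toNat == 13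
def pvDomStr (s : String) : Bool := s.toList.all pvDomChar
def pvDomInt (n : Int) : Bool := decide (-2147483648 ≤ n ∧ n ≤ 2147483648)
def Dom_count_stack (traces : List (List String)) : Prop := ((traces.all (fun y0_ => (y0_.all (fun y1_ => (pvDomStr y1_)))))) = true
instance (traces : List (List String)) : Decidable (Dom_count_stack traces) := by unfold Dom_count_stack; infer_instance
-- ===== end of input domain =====

-- B builds no tree at all: it recursively groups the traces by their first
-- function (first-occurrence order) and renders each group, the group size
-- being the count; objective: alternative (same output, different algorithm).

-- f"{'    ' * depth}{node.name}, {node.count * 10} ms"  (same f-string in both Pythons)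
def pvLine (name : String) (cnt : Int) (depth : Int) : String :=
  String.ofList (PySem.List.pyRepeat "    ".toList depth) ++ name ++ ", " ++
    PySem.Int.toStr (cnt * 10) ++ " ms"

-- ===== PORT A =====

-- the Python Node tree: name, count, insertion-ordered children (mutual pair,
-- not a nested inductive)
mutual
inductive PNode : Type where
  | mk : String → Int → PForest → PNode
inductive PForest : Type where
  | nil : PForest
  | cons : PNode → PForest → PForest
end

-- 'if func not in node.children: node.children[func] = Node(func); node = …; node.count += 1'
-- applied at one level, then the continuation k descends into that child's children
def pvModifyChild (x : String) (k : PForest → PForest) : PForest → PForest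
  | .nil => .cons (.mk x 1 (k .nil)) .nil
  | .cons (.mk name cnt ch) f' =>
      if name = x then .cons (.mk name (cnt + 1) (k ch)) f'
      else .cons (.mk name cnt ch) (pvModifyChild x k f')

-- 'for func in trace: …' — one trace inserted into a forest of children
def pvAddTrace : List String → PForest → PForest
  | [], f => f
  | x :: rest, f => pvModifyChild x (pvAddTrace rest) f

-- 'for trace in traces: …' — the children of root after the build loop
def pvBuild (traces : List (List String)) : PForest :=
  traces.foldl (fun f t => pvAddTrace t f) .nil

-- A's recursive render: node's line, then its children recursively, then siblings
def pvRender : PForest → Int → List String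
  | .nil, _ => []
  | .cons (.mk name cnt ch) f', depth =>
      pvLine name cnt depth :: (pvRender ch (depth + 1) ++ pvRender f' depth)

def count_stack (traces : List (List String)) : String :=
  PySem.Str.join "\n" (pvRender (pvBuild traces) 0)

-- ===== PORT B =====

-- t[0] (go is only ever called with nonempty traces, so t[0] is ported as headD "")
def pvHd (t : List String) : String := t.headD ""

-- 'seen = []; for t in group: if t[0] not in seen: seen.append(t[0])'
def pvSeen (g : List (List String)) : List String :=
  g.foldl (fun s t => if s.contains (pvHd t) then s else s ++ [pvHd t]) []

-- 'tails = [t[1:] for t in group if t[0] == h]'  (t[1:] on a list is drop 1, exact)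
def pvTails (h : String) (g : List (List String)) : List (List String) :=
  (g.filter (fun t => pvHd t == h)).map (fun t => t.drop 1)

-- measure used only as FUEL making go total (Python's recursion terminates by itself)
def pvMsr (g : List (List String)) : Nat := (g.map (fun t => t.length + 1)).sum

-- 'def go(group, depth): … return lines' — fuel-guarded structural recursion
def pvGo : Nat → List (List String) → Int → List String
  | 0, _, _ => []
  | fuel + 1, g, d =>
      (pvSeen g).flatMap (fun h =>
        pvLine h ((pvTails h g).length : Int) d ::
          pvGo fuel ((pvTails h g).filter (fun s => !s.isEmpty)) (d + 1))

def count_stack_alt (traces : List (List String)) : String :=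
  PySem.Str.join "\n"
    (pvGo (pvMsr (traces.filter (fun t => !t.isEmpty)))
      (traces.filter (fun t => !t.isEmpty)) 0)

-- ===== PRECONDITION & SPEC =====
def Spec_count_stack (traces : List (List String)) (out : String) : Prop := out = count_stack_alt traces
instance (traces : List (List String)) (out : String) : Decidable (Spec_count_stack traces out) := by unfold Spec_count_stack; infer_instance

-- ===== CLAIM (what is proved, stated in full; the proofs are below) =====
def Claim_equal_count_stack : Prop := ∀ (traces : List (List String)), Dom_count_stack traces → Spec_count_stack traces (count_stack traces)

-- ===== LEMMAS AND PROOFS =====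

-- the count of head h in group g, as Python's int
def pvCnt (h : String) (g : List (List String)) : Int :=
  ((g.filter (fun t => pvHd t == h)).length : Int)

-- the canonical forest of a group: one node per head in hs, in order
def pvMkF : List String → List (List String) → PForest
  | [], _ => .nil
  | h :: hs, g => .cons (.mk h (pvCnt h g) (pvBuild (pvTails h g))) (pvMkF hs g)

def pvSnoc : PForest → PNode → PForest
  | .nil, n => .cons n .nil
  | .cons m f, n => .cons m (pvSnoc f n)

theorem pvBuild_filter (ts : List (List String)) :
    ∀ f : PForest,
      (ts.filter (fun t => !t.isEmpty)).foldl (fun f t => pvAddTrace t f) f =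
      ts.foldl (fun f t => pvAddTrace t f) f := by
  induction ts with
  | nil => intro f; rfl
  | cons t ts ih =>
      intro f
      cases t with
      | nil => simpa [List.filter] using ih f
      | cons x r => simpa [List.filter] using ih (pvAddTrace (x :: r) f)

theorem pvSeen_append (g : List (List String)) (t : List String) :
    pvSeen (g ++ [t]) =
      if pvHd t ∈ pvSeen g then pvSeen g else pvSeen g ++ [pvHd t] := by
  simp [pvSeen, List.foldl_append]

theorem pvMem_seen (g : List (List String)) (x : String) :
    x ∈ pvSeen g ↔ ∃ t ∈ g, pvHd t = x := by
  induction g using List.reverseRecOn with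
  | nil => simp [pvSeen]
  | append_singleton g t ih =>
      rw [pvSeen_append]
      by_cases hc : pvHd t ∈ pvSeen g
      · rw [if_pos hc, ih]
        constructor
        · rintro ⟨u, hu, he⟩; exact ⟨u, List.mem_append_left _ hu, he⟩
        · rintro ⟨u, hu, he⟩
          rcases List.mem_append.mp hu with h1 | h1
          · exact ⟨u, h1, he⟩
          · have hut : u = t := by simpa using h1
            subst hut; exact ih.mp (he ▸ hc)
      · rw [if_neg hc]
        constructor
        · intro hx
          rcases List.mem_append.mp hx with h1 | h1
          · rcases ih.mp h1 with ⟨u, hu, he⟩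
            exact ⟨u, List.mem_append_left _ hu, he⟩
          · have hxt : x = pvHd t := by simpa using h1
            exact ⟨t, by simp, hxt.symm⟩
        · rintro ⟨u, hu, he⟩
          rcases List.mem_append.mp hu with h1 | h1
          · exact List.mem_append_left _ (ih.mpr ⟨u, h1, he⟩)
          · have hut : u = t := by simpa using h1
            subst hut; simp [he]

theorem pvSeen_nodup (g : List (List String)) : (pvSeen g).Nodup := by
  induction g using List.reverseRecOn with
  | nil => simp [pvSeen]
  | append_singleton g t ih =>
      rw [pvSeen_append]
      by_cases hc : pvHd t ∈ pvSeen g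
      · rw [if_pos hc]; exact ih
      · rw [if_neg hc]
        apply List.Nodup.append ih (List.nodup_singleton _)
        intro a ha hb
        have hat : a = pvHd t := by simpa using hb
        exact hc (hat ▸ ha)

theorem pvCnt_append_ne (h' : String) (g : List (List String)) (t : List String)
    (hne : pvHd t ≠ h') :
    pvCnt h' (g ++ [t]) = pvCnt h' g ∧ pvTails h' (g ++ [t]) = pvTails h' g := by
  constructor <;> simp [pvCnt, pvTails, List.filter_append, hne]

theorem pvCnt_append_eq (h : String) (g : List (List String)) (t : List String)
    (he : pvHd t = h) :
    pvCnt h (g ++ [t]) = pvCnt h g + 1 ∧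
    pvTails h (g ++ [t]) = pvTails h g ++ [t.drop 1] := by
  constructor <;> simp [pvCnt, pvTails, List.filter_append, he]

theorem pvCnt_notin (h : String) (g : List (List String)) (hn : h ∉ pvSeen g) :
    g.filter (fun t => pvHd t == h) = [] := by
  rw [List.filter_eq_nil_iff]
  intro t ht hb
  exact hn ((pvMem_seen g h).mpr ⟨t, ht, by simpa using hb⟩)

theorem pvBuild_snoc (g : List (List String)) (t : List String) :
    pvBuild (g ++ [t]) = pvAddTrace t (pvBuild g) := by
  simp [pvBuild, List.foldl_append]

theorem pvMkF_congr (hs : List String) (g g' : List (List String))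
    (H : ∀ h ∈ hs, pvCnt h g = pvCnt h g' ∧ pvTails h g = pvTails h g') :
    pvMkF hs g = pvMkF hs g' := by
  induction hs with
  | nil => rfl
  | cons h hs ih =>
      have h1 := H h (by simp)
      simp [pvMkF, h1.1, h1.2, ih (fun h' hm => H h' (by simp [hm]))]

theorem pvMkF_snoc (hs : List String) (h : String) (g : List (List String)) :
    pvMkF (hs ++ [h]) g =
      pvSnoc (pvMkF hs g) (.mk h (pvCnt h g) (pvBuild (pvTails h g))) := by
  induction hs with
  | nil => rfl
  | cons h' hs ih => simp [pvMkF, pvSnoc, ih]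

theorem pvModify_mkF_notmem (h : String) (k : PForest → PForest)
    (hs : List String) (g : List (List String)) (hn : h ∉ hs) :
    pvModifyChild h k (pvMkF hs g) = pvSnoc (pvMkF hs g) (.mk h 1 (k .nil)) := by
  induction hs with
  | nil => rfl
  | cons h' hs ih =>
      have hne : h' ≠ h := fun e => hn (by simp [e])
      simp [pvMkF, pvModifyChild, pvSnoc, hne, ih (fun m => hn (by simp [m]))]

theorem pvModify_mkF_mem (h : String) (k : PForest → PForest)
    (hs : List String) (g g' : List (List String))
    (hm : h ∈ hs) (hnd : hs.Nodup)
    (H1 : pvCnt h g' = pvCnt h g + 1)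
    (H2 : pvBuild (pvTails h g') = k (pvBuild (pvTails h g)))
    (H3 : ∀ h' ∈ hs, h' ≠ h → pvCnt h' g' = pvCnt h' g ∧ pvTails h' g' = pvTails h' g) :
    pvModifyChild h k (pvMkF hs g) = pvMkF hs g' := by
  induction hs with
  | nil => simp at hm
  | cons h' hs ih =>
      by_cases he : h' = h
      · subst he
        have hnotin : h' ∉ hs := (List.nodup_cons.mp hnd).1
        show pvModifyChild h' k (.cons (.mk h' (pvCnt h' g) (pvBuild (pvTails h' g))) (pvMkF hs g)) = _
        rw [pvModifyChild, if_pos rfl]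
        show PForest.cons (.mk h' (pvCnt h' g + 1) (k (pvBuild (pvTails h' g)))) (pvMkF hs g) = _
        rw [← H1, ← H2]
        show _ = PForest.cons (.mk h' (pvCnt h' g') (pvBuild (pvTails h' g'))) (pvMkF hs g')
        congr 1
        refine pvMkF_congr hs g g' (fun m hm2 => ?_)
        have hx := H3 m (by simp [hm2]) (fun e => hnotin (e ▸ hm2))
        exact ⟨hx.1.symm, hx.2.symm⟩
      · have hm' : h ∈ hs := by
          rcases List.mem_cons.mp hm with e | m
          · exact absurd e.symm he
          · exact m
        have hx := H3 h' (by simp) he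
        show pvModifyChild h k (.cons (.mk h' (pvCnt h' g) (pvBuild (pvTails h' g))) (pvMkF hs g)) = _
        rw [pvModifyChild, if_neg he]
        rw [ih hm' (List.nodup_cons.mp hnd).2 (fun m hm2 hne => H3 m (by simp [hm2]) hne)]
        show _ = PForest.cons (.mk h' (pvCnt h' g') (pvBuild (pvTails h' g'))) (pvMkF hs g')
        rw [hx.1, hx.2]

-- the trie A builds is the canonical group-by forest
theorem pvBuild_eq_mkF (g : List (List String)) (hne : ∀ t ∈ g, t ≠ []) :
    pvBuild g = pvMkF (pvSeen g) g := by
  induction g using List.reverseRecOn with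
  | nil => rfl
  | append_singleton g t ih =>
      have hg : ∀ u ∈ g, u ≠ [] := fun u hu => hne u (by simp [hu])
      cases t with
      | nil => exact absurd rfl (hne [] (by simp))
      | cons th rest =>
      have hhd : pvHd (th :: rest) = th := rfl
      rw [pvBuild_snoc, ih hg, pvSeen_append, hhd]
      show pvModifyChild th (pvAddTrace rest) _ = _
      by_cases hm : th ∈ pvSeen g
      · rw [if_pos hm]
        refine pvModify_mkF_mem th (pvAddTrace rest) (pvSeen g) g (g ++ [th :: rest])
          hm (pvSeen_nodup g) ?_ ?_ ?_
        · exact (pvCnt_append_eq th g (th :: rest) hhd).1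
        · rw [(pvCnt_append_eq th g (th :: rest) hhd).2]
          show pvBuild (pvTails th g ++ [rest]) = _
          rw [pvBuild_snoc]
        · intro h' _ hx
          refine pvCnt_append_ne h' g (th :: rest) ?_
          rw [hhd]; exact fun e => hx e.symm
      · rw [if_neg hm]
        rw [pvModify_mkF_notmem th (pvAddTrace rest) (pvSeen g) g hm, pvMkF_snoc]
        have hmk : pvMkF (pvSeen g) g = pvMkF (pvSeen g) (g ++ [th :: rest]) := by
          refine pvMkF_congr (pvSeen g) g (g ++ [th :: rest]) (fun h' hm' => ?_)
          have hne' : pvHd (th :: rest) ≠ h' := by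
            rw [hhd]; intro e; exact hm (by rw [e]; exact hm')
          have hx := pvCnt_append_ne h' g (th :: rest) hne'
          exact ⟨hx.1.symm, hx.2.symm⟩
        rw [hmk]
        congr 1
        have hfil := pvCnt_notin th g hm
        have hcnt : pvCnt th (g ++ [th :: rest]) = 1 := by
          simp [pvCnt, List.filter_append, hfil, hhd]
        have htl : pvTails th (g ++ [th :: rest]) = [rest] := by
          simp [pvTails, List.filter_append, hfil, hhd]
        rw [hcnt, htl]
        rfl

theorem pvRender_mkF (hs : List String) (g : List (List String)) (d : Int) :
    pvRender (pvMkF hs g) d =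
      hs.flatMap (fun h =>
        pvLine h (pvCnt h g) d :: pvRender (pvBuild (pvTails h g)) (d + 1)) := by
  induction hs with
  | nil => rfl
  | cons h hs ih => simp [pvMkF, pvRender, ih]

theorem pvMsr_filter_le (g : List (List String)) (p : List String → Bool) :
    pvMsr (g.filter p) ≤ pvMsr g := by
  induction g with
  | nil => simp
  | cons t g ih =>
      by_cases hp : p t <;> simp [pvMsr, hp] at * <;> omega

theorem pvMsr_tails_add (G : List (List String)) :
    pvMsr ((G.map (fun t => t.drop 1)).filter (fun s => !s.isEmpty)) + G.length ≤ pvMsr G := by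
  induction G with
  | nil => simp [pvMsr]
  | cons t G ih =>
      cases t with
      | nil => simp [pvMsr] at *; omega
      | cons a r =>
          cases r with
          | nil => simp [pvMsr] at *; omega
          | cons b r' => simp [pvMsr] at *; omega

theorem pvMsr_lt (g : List (List String)) (h : String) (hm : h ∈ pvSeen g) :
    pvMsr ((pvTails h g).filter (fun s => !s.isEmpty)) < pvMsr g := by
  rcases (pvMem_seen g h).mp hm with ⟨t, ht, he⟩
  have hmemG : t ∈ g.filter (fun t => pvHd t == h) :=
    List.mem_filter.mpr ⟨ht, by simp [he]⟩
  have hlen : 1 ≤ (g.filter (fun t => pvHd t == h)).length :=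
    List.length_pos_of_mem hmemG
  have h1 := pvMsr_tails_add (g.filter (fun t => pvHd t == h))
  have h2 := pvMsr_filter_le g (fun t => pvHd t == h)
  simp only [pvTails]
  omega

theorem pvMsr_eq_zero (g : List (List String)) (hz : pvMsr g = 0) : g = [] := by
  cases g with
  | nil => rfl
  | cons t g => simp [pvMsr] at hz

-- B's recursive group-by render equals A's render of the built trie
theorem pvMain (fuel : Nat) :
    ∀ (g : List (List String)) (d : Int), pvMsr g ≤ fuel → (∀ t ∈ g, t ≠ []) →
      pvGo fuel g d = pvRender (pvBuild g) d := by
  induction fuel with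
  | zero =>
      intro g d hf _
      rw [pvMsr_eq_zero g (Nat.le_zero.mp hf)]
      rfl
  | succ m ih =>
      intro g d hf hne
      rw [pvGo, pvBuild_eq_mkF g hne, pvRender_mkF]
      refine List.flatMap_congr (fun h hm => ?_)
      have hcast : ((pvTails h g).length : Int) = pvCnt h g := by
        simp [pvTails, pvCnt]
      rw [hcast]
      congr 1
      have hlt := pvMsr_lt g h hm
      rw [ih ((pvTails h g).filter (fun s => !s.isEmpty)) (d + 1) (by omega)
        (fun t ht => by
          have := (List.mem_filter.mp ht).2
          simpa [List.isEmpty_iff] using this)]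
      congr 1
      show pvBuild ((pvTails h g).filter (fun t => !t.isEmpty)) = pvBuild (pvTails h g)
      exact pvBuild_filter (pvTails h g) PForest.nil

-- ===== VERDICT (by name: the statement is the Claim_ definition above) =====
theorem count_stack_spec : Claim_equal_count_stack := by
  intro traces _
  unfold Spec_count_stack count_stack count_stack_alt
  congr 1
  rw [pvMain (pvMsr (traces.filter (fun t => !t.isEmpty)))
      (traces.filter (fun t => !t.isEmpty)) 0 le_rfl
      (fun t ht => by
        have := (List.mem_filter.mp ht).2
        simpa [List.isEmpty_iff] using this)]
  congr 1
  exact (pvBuild_filter traces PForest.nil).symm
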